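-- pv_equiv track=rewrite | github.com/WwzFwz/finoss-cobol-intel | src/cobol_intel/parsers/preprocessor.py | _uppercase_preserving_strings
-- ===== SOURCE A (Python) =====
-- def _uppercase_preserving_strings(line: str) -> str:
--     """Convert to uppercase but preserve string literal contents."""
--     result = []
--     in_string = False
--     quote_char = None
--
--     for char in line:
--         if in_string:
--             result.append(char)
--             if char == quote_char:
--                 in_string = False
--         else:
--             if char in ('"', "'"):
--                 in_string = True
--                 quote_char = char
--                 result.append(char)
--             else:
--                 result.append(char.upper())
--
--     return "".join(result)
-- ===== SOURCE B (Python) =====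
-- def _uppercase_preserving_strings(line: str) -> str:
--     """Segment-based rewrite: locate literal boundaries and uppercase whole
--     slices between them instead of running a per-character state machine."""
--     out = []
--     rest = line
--     while rest:
--         q = next((j for j, ch in enumerate(rest) if ch in '"\''), None)
--         if q is None:
--             out.append(rest.upper())
--             break
--         qc = rest[q]
--         out.append(rest[:q].upper() + qc)
--         body = rest[q + 1:]
--         e = next((j for j, ch in enumerate(body) if ch == qc), None)
--         if e is None:
--             out.append(body)
--             break
--         out.append(body[:e + 1])
--         rest = body[e + 1:]
--     return "".join(out)
-- ===== Notes on version B (the rewrite author's own statement) =====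
-- stated objective: alternative
-- what changed: Replaced the per-character in_string/quote_char state machine with a segment-shaped pass that finds each literal's boundaries and uppercases whole slices between literals, copying each literal slice verbatim.
import Mathlib
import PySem

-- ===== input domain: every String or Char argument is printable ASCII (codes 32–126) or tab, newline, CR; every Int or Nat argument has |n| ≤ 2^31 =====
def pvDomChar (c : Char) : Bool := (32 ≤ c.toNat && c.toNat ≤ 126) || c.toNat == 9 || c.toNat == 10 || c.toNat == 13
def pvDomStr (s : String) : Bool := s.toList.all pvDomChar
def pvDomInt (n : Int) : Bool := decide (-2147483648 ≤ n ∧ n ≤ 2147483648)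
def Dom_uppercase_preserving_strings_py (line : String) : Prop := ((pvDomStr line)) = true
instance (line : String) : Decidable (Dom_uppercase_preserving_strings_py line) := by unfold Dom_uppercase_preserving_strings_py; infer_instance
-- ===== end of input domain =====

-- B replaces A's per-character state machine by a segment pass over literal boundaries (objective: alternative, same cost).

-- ===== PORT A =====
-- the for-loop with state (result, in_string, quote_char); quote_char : Option Char (None initially)
def pvALoop (cs : List Char) (in_string : Bool) (quote : Option Char) (acc : List Char) : List Char :=
  match cs with
  | [] => acc
  | c :: rest =>
    if in_string then
      pvALoop rest (if quote == some c then false else true) quote (acc ++ [c])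
    else if c == '"' || c == '\'' then
      pvALoop rest true (some c) (acc ++ [c])
    else
      pvALoop rest false quote (acc ++ [PySem.Chars.upperChar c])

def uppercase_preserving_strings_py (line : String) : String :=
  String.ofList (pvALoop line.toList false none [])

-- ===== PORT B =====
-- Source B's while loop over the remaining string: find the next quote index, uppercase
-- the slice before it, copy the literal slice verbatim, continue after its closing quote.
def pvIsQuote (c : Char) : Bool := c == '"' || c == '\''

def pvBLoop : List Char → List Char
  | [] => []
  | c :: cs =>
    match (c :: cs).findIdx? pvIsQuote with
    | none => PySem.Chars.upper (c :: cs)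
    | some q =>
      let qc := (c :: cs).getD q ' '   -- rest[q]; q is in range whenever findIdx? returns it
      let body := (c :: cs).drop (q + 1)
      PySem.Chars.upper ((c :: cs).take q) ++ [qc] ++
        (match body.findIdx? (· == qc) with
         | none => body
         | some e => body.take (e + 1) ++ pvBLoop (body.drop (e + 1)))
termination_by rest => rest.length
decreasing_by simp

def uppercase_preserving_strings_py_alt (line : String) : String :=
  String.ofList (pvBLoop line.toList)

-- ===== PRECONDITION & SPEC =====
def Spec_uppercase_preserving_strings_py (line : String) (out : String) : Prop := out = uppercase_preserving_strings_py_alt line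
instance (line : String) (out : String) : Decidable (Spec_uppercase_preserving_strings_py line out) := by unfold Spec_uppercase_preserving_strings_py; infer_instance

-- ===== CLAIM (what is proved, stated in full; the proofs are below) =====
def Claim_equal_uppercase_preserving_strings_py : Prop := ∀ (line : String), Dom_uppercase_preserving_strings_py line → Spec_uppercase_preserving_strings_py line (uppercase_preserving_strings_py line)

-- ===== LEMMAS AND PROOFS =====

theorem pvALoop_acc (cs : List Char) (b : Bool) (q : Option Char) (acc : List Char) :
    pvALoop cs b q acc = acc ++ pvALoop cs b q [] := by
  induction cs generalizing b q acc with
  | nil => simp [pvALoop]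
  | cons c rest ih =>
    simp only [pvALoop]
    split_ifs <;>
      rw [ih _ _ (acc ++ _), ih _ _ ([] ++ _)] <;> simp

-- uppercasing a quote-free prefix in the not-in-string state
theorem pvALoop_false_prefix (pre rest : List Char) (q : Option Char)
    (h : ∀ c ∈ pre, pvIsQuote c = false) :
    pvALoop (pre ++ rest) false q [] = pre.map PySem.Chars.upperChar ++ pvALoop rest false q [] := by
  induction pre generalizing q with
  | nil => simp
  | cons c pre' ih =>
    have hc : (c == '"' || c == '\'') = false := by
      have := h c (by simp); simpa [pvIsQuote] using this
    simp only [List.cons_append, pvALoop, hc, Bool.false_eq_true, if_false]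
    rw [pvALoop_acc, ih _ (fun d hd => h d (by simp [hd]))]
    simp

-- copying a literal body verbatim while in the string state
theorem pvALoop_true_prefix (lit rest : List Char) (qc : Char)
    (h : ∀ c ∈ lit, (c == qc) = false) :
    pvALoop (lit ++ rest) true (some qc) [] = lit ++ pvALoop rest true (some qc) [] := by
  induction lit with
  | nil => simp
  | cons c lit' ih =>
    have hc : (c == qc) = false := h c (by simp)
    simp only [List.cons_append, pvALoop]
    rw [show (some qc == some c) = false by simp_all [BEq.comm]]
    simp only [Bool.false_eq_true, if_false]
    rw [pvALoop_acc, ih (fun d hd => h d (by simp [hd]))]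
    simp

theorem pvMain (n : Nat) (cs : List Char) (q0 : Option Char) (hn : cs.length ≤ n) :
    pvALoop cs false q0 [] = pvBLoop cs := by
  induction n generalizing cs q0 with
  | zero =>
    have : cs = [] := List.eq_nil_of_length_eq_zero (Nat.le_zero.mp hn)
    subst this; rw [pvBLoop.eq_def]; simp [pvALoop]
  | succ n ih =>
    match cs with
    | [] => rw [pvBLoop.eq_def]; simp [pvALoop]
    | c :: cs' =>
    rw [pvBLoop.eq_def]
    cases hq : (c :: cs').findIdx? pvIsQuote with
    | none =>
      have hall := List.findIdx?_eq_none_iff.mp hq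
      simp only [hq]
      have h2 : c :: cs' = (c :: cs') ++ [] := by simp
      rw [h2, pvALoop_false_prefix _ [] q0 hall]
      simp [pvALoop, PySem.Chars.upper]
    | some q =>
      obtain ⟨hqlt, hpq, hlt⟩ := List.findIdx?_eq_some_iff_getElem.mp hq
      simp only [hq]
      have hgetD : (c :: cs').getD q ' ' = (c :: cs')[q] := List.getD_eq_getElem _ _ hqlt
      rw [hgetD]
      have hsplit : c :: cs' = (c :: cs').take q ++ (c :: cs')[q] :: (c :: cs').drop (q + 1) := by
        conv_lhs => rw [← List.take_append_drop q (c :: cs')]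
        rw [List.drop_eq_getElem_cons hqlt]
      have hpre : ∀ d ∈ (c :: cs').take q, pvIsQuote d = false := by
        intro d hd
        obtain ⟨j, hj, rfl⟩ := List.mem_take_iff_getElem.mp hd
        exact Bool.not_eq_true _ ▸ hlt j (by omega)
      conv_lhs => rw [hsplit]
      rw [pvALoop_false_prefix _ _ q0 hpre]
      set qc := (c :: cs')[q] with hqc
      set body := (c :: cs').drop (q + 1) with hbody
      have hstep : pvALoop (qc :: body) false q0 [] = qc :: pvALoop body true (some qc) [] := by
        have hq2 : (qc == '"' || qc == '\'') = true := by simpa [pvIsQuote] using hpq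
        simp only [pvALoop, Bool.false_eq_true, if_false, hq2, if_pos]
        rw [pvALoop_acc]; simp
      rw [hstep]
      have hupper : ∀ l : List Char, PySem.Chars.upper l = l.map PySem.Chars.upperChar := fun _ => rfl
      cases he : body.findIdx? (· == qc) with
      | none =>
        have hall := List.findIdx?_eq_none_iff.mp he
        have h2 : body = body ++ [] := by simp
        rw [h2, pvALoop_true_prefix body [] qc (by simpa using hall)]
        simp [pvALoop, hupper, List.map_take]
      | some e =>
        obtain ⟨helt, hpe, helts⟩ := List.findIdx?_eq_some_iff_getElem.mp he
        have hbsplit : body = body.take e ++ body[e] :: body.drop (e + 1) := by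
          conv_lhs => rw [← List.take_append_drop e body]
          rw [List.drop_eq_getElem_cons helt]
        have hlitpre : ∀ d ∈ body.take e, (d == qc) = false := by
          intro d hd
          obtain ⟨j, hj, rfl⟩ := List.mem_take_iff_getElem.mp hd
          have := helts j (by omega)
          simpa using this
        have hbe : body[e] = qc := by simpa using hpe
        conv_lhs => rw [hbsplit]
        rw [pvALoop_true_prefix _ _ qc hlitpre]
        have hclose : pvALoop (body[e] :: body.drop (e + 1)) true (some qc) []
            = body[e] :: pvALoop (body.drop (e + 1)) false (some qc) [] := by
          simp only [pvALoop, hbe, BEq.rfl]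
          rw [pvALoop_acc]; simp
        have hlen : (body.drop (e + 1)).length ≤ n := by
          simp only [hbody, List.length_drop, List.length_cons] at *
          omega
        rw [hclose, ih (body.drop (e + 1)) (some qc) hlen]
        have htake : body.take (e + 1) = body.take e ++ [body[e]] := by
          rw [List.take_add_one]; simp [helt]
        simp only [hupper, List.map_take, htake, List.append_assoc, List.cons_append, List.nil_append]

-- ===== VERDICT (by name: the statement is the Claim_ definition above) =====
theorem uppercase_preserving_strings_py_spec : Claim_equal_uppercase_preserving_strings_py := by
  intro line _
  unfold Spec_uppercase_preserving_strings_py uppercase_preserving_strings_py uppercase_preserving_strings_py_alt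
  rw [pvMain line.toList.length line.toList none le_rfl]
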